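-- pv_equiv track=rewrite | github.com/qeedquan/challenges | codegolf/a121016-numbers-whose-binary-expansion-is-properly-periodic-or-a328594-number.py | A121016
-- ===== SOURCE A (Python) =====
-- def A121016(n):
--     r = []
--     i = 1
--     while len(r) < n:
--         s = f"{i:b}"
--         s2 = (s + s)[1:-1]
--         if s in s2 and s2 != i:
--             r.append(i)
--         i += 1
--     return r
-- ===== SOURCE B (Python) =====
-- def A121016(n):
--     r = []
--     i = 1
--     L = 1
--     ds = []  # proper divisors of L; L only ever grows, so recompute lazily
--     while len(r) < n:
--         if i.bit_length() != L:
--             L = i.bit_length()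
--             ds = [d for d in range(1, L) if L % d == 0]
--         for t in ds:
--             if (i >> t) + ((i % (1 << t)) << (L - t)) == i:
--                 r.append(i)
--                 break
--         i += 1
--     return r
-- ===== Notes on version B (the rewrite author's own statement) =====
-- stated objective: alternative
-- what changed: B replaces A's string machinery (binary formatting, doubling, slicing and substring search) by pure integer arithmetic: i is properly periodic iff some bit-rotation of its binary expansion by t in [1, bit_length-1] reproduces i, tested with shifts and mod.
import Mathlib
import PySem

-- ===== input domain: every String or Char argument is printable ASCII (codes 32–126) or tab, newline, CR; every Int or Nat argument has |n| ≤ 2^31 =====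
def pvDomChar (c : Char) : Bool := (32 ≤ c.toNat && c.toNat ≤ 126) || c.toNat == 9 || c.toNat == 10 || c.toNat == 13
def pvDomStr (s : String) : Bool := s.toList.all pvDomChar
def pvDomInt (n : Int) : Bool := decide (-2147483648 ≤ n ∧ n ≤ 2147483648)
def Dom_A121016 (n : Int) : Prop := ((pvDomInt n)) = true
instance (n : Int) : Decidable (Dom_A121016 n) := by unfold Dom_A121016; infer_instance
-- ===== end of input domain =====

-- B replaces A's string machinery (binary format, doubling, slice, substring search) by pure
-- integer arithmetic (bit-rotation test with shifts and mod); alternative, not faster.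

-- ===== PORT A =====
-- the while-loop of A, one fuel unit per iteration (fuel only makes the recursion total)
def pvLoopA : Nat → Int → Int → List Int → List Int
  | 0, _, _, r => r
  | f+1, n, i, r =>
    if PySem.List.len r < n then
      let s := PySem.Int.toBin i                              -- s = f"{i:b}"
      let s2 := PySem.Str.slice (s ++ s) (some 1) (some (-1)) -- s2 = (s + s)[1:-1]
      -- Python's 's2 != i' compares a str with an int and is always True, so the
      -- condition reduces to the substring test
      let r' := if PySem.Str.isIn s s2 then r ++ [i] else r
      pvLoopA f n (i+1) r'
    else r

def A121016 (n : Int) : List Int := pvLoopA (4 * (n.toNat + 1)^2 + 4) n 1 []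
-- (the fuel covers every run: below 4*(n+1)^2 there are already at least n properly
-- periodic numbers — every doubled bit string mm qualifies)

-- ===== PORT B =====
def pvLoopB : Nat → Int → Int → Int → List Int → List Int → List Int
  | 0, _, _, _, _, r => r
  | f+1, n, i, L, ds, r =>
    if PySem.List.len r < n then
      -- if i.bit_length() != L: L = i.bit_length(); ds = [d for d in range(1, L) if L % d == 0]
      let Lds :=
        if ((PySem.Int.bitLength i : Int)) != L then
          ((PySem.Int.bitLength i : Int),
            (PySem.List.pyRange 1 (PySem.Int.bitLength i : Int)).filter
              (fun d => PySem.Int.mod (PySem.Int.bitLength i : Int) d == 0))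
        else (L, ds)
      -- for t in ds: if (i >> t) + ((i % (1 << t)) << (L - t)) == i: r.append(i); break
      -- (shift amounts t and L - t are nonnegative here)
      let r' :=
        if Lds.2.any (fun t =>
            (i >>> t.toNat) + (PySem.Int.mod i (1 <<< t.toNat)) <<< (Lds.1 - t).toNat == i)
          then r ++ [i] else r
      pvLoopB f n (i+1) Lds.1 Lds.2 r'
    else r

def A121016_alt (n : Int) : List Int := pvLoopB (4 * (n.toNat + 1)^2 + 4) n 1 1 [] []

-- ===== PRECONDITION & SPEC =====
def Spec_A121016 (n : Int) (out : List Int) : Prop := out = A121016_alt n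
instance (n : Int) (out : List Int) : Decidable (Spec_A121016 n out) := by unfold Spec_A121016; infer_instance

-- ===== CLAIM (what is proved, stated in full; the proofs are below) =====
def Claim_equal_A121016 : Prop := ∀ (n : Int), Dom_A121016 n → Spec_A121016 n (A121016 n)

-- ===== LEMMAS AND PROOFS =====

-- MSB-first binary digits of a natural number (proof-side mirror of Nat.toDigits 2)
def pvBits (n : Nat) : List Char :=
  if n < 2 then [Nat.digitChar n] else pvBits (n / 2) ++ [Nat.digitChar (n % 2)]

theorem pvToDigitsCore_eq (f : Nat) : ∀ n ds, n < f →
    Nat.toDigitsCore 2 f n ds = pvBits n ++ ds := by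
  induction f with
  | zero => omega
  | succ f ih =>
    intro n ds hn
    rw [Nat.toDigitsCore]
    by_cases h2 : n / 2 = 0
    · have : n < 2 := by omega
      rw [if_pos h2, pvBits, if_pos this]
      have : n % 2 = n := Nat.mod_eq_of_lt this
      simp [this]
    · have hn2 : ¬ n < 2 := by omega
      have hb : pvBits n = pvBits (n / 2) ++ [(n % 2).digitChar] := by
        rw [pvBits, if_neg hn2]
      rw [if_neg h2, ih (n / 2) _ (by omega), hb]
      simp

theorem pvToDigits_eq (n : Nat) : Nat.toDigits 2 n = pvBits n := by
  rw [Nat.toDigits, pvToDigitsCore_eq (n+1) n [] (by omega)]; simp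

def pvBVal (c : Char) : Nat := if c = '1' then 1 else 0

def pvVal (ds : List Char) : Nat := ds.foldl (fun a c => 2 * a + pvBVal c) 0

def pvIsBin (ds : List Char) : Prop := ∀ c ∈ ds, c = '0' ∨ c = '1'

theorem pvVal_from (ds : List Char) : ∀ x : Nat,
    ds.foldl (fun a c => 2 * a + pvBVal c) x = x * 2 ^ ds.length + pvVal ds := by
  induction ds with
  | nil => intro x; simp [pvVal]
  | cons c t ih =>
    intro x
    simp only [List.foldl_cons, List.length_cons]
    rw [ih (2 * x + pvBVal c), show pvVal (c :: t) = List.foldl (fun a c => 2 * a + pvBVal c) (2 * 0 + pvBVal c) t from rfl, ih (2 * 0 + pvBVal c)]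
    ring

theorem pvVal_singleton (c : Char) : pvVal [c] = pvBVal c := by
  simp [pvVal]

theorem pvVal_append (a b : List Char) :
    pvVal (a ++ b) = pvVal a * 2 ^ b.length + pvVal b := by
  simp only [pvVal, List.foldl_append]
  rw [pvVal_from b (List.foldl (fun a c => 2 * a + pvBVal c) 0 a)]
  rfl

theorem pvVal_cons (c : Char) (t : List Char) :
    pvVal (c :: t) = pvBVal c * 2 ^ t.length + pvVal t := by
  have h := pvVal_append [c] t
  simpa [pvVal_singleton] using h

theorem pvVal_lt (ds : List Char) (h : pvIsBin ds) : pvVal ds < 2 ^ ds.length := by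
  induction ds with
  | nil => simp [pvVal]
  | cons c t ih =>
    have hc : pvBVal c < 2 := by unfold pvBVal; split <;> omega
    have ht : pvVal t < 2 ^ t.length := ih (fun x hx => h x (List.mem_cons_of_mem _ hx))
    rw [pvVal_cons, List.length_cons, pow_succ]
    nlinarith
theorem pvVal_inj : ∀ (a b : List Char), pvIsBin a → pvIsBin b →
    a.length = b.length → pvVal a = pvVal b → a = b := by
  intro a
  induction a with
  | nil => intro b _ _ hl _; simpa using (List.length_eq_zero_iff.mp hl.symm).symm
  | cons c t ih =>
    intro b ha hb hl hv
    cases b with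
    | nil => simp at hl
    | cons d u =>
      have hlen : t.length = u.length := by simpa using hl
      have hvc := pvVal_cons c t
      have hvd := pvVal_cons d u
      have htl : pvVal t < 2 ^ t.length := pvVal_lt t (fun x hx => ha x (List.mem_cons_of_mem _ hx))
      have hul : pvVal u < 2 ^ u.length := pvVal_lt u (fun x hx => hb x (List.mem_cons_of_mem _ hx))
      rw [← hlen] at hul
      rw [hvc, hvd, ← hlen] at hv
      have hbv : pvBVal c = pvBVal d := by
        rcases Nat.lt_trichotomy (pvBVal c) (pvBVal d) with h | h | h
        · exfalso
          have hx : (pvBVal c + 1) * 2 ^ t.length ≤ pvBVal d * 2 ^ t.length :=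
            Nat.mul_le_mul_right _ (by omega)
          rw [add_mul, one_mul] at hx
          linarith
        · exact h
        · exfalso
          have hx : (pvBVal d + 1) * 2 ^ t.length ≤ pvBVal c * 2 ^ t.length :=
            Nat.mul_le_mul_right _ (by omega)
          rw [add_mul, one_mul] at hx
          linarith
      have hvtu : pvVal t = pvVal u := by
        rw [hbv] at hv
        omega
      have hcd : c = d := by
        rcases ha c (List.mem_cons_self) with h1 | h1 <;>
          rcases hb d (List.mem_cons_self) with h2 | h2 <;>
            simp [pvBVal, h1, h2] at hbv ⊢
      rw [hcd, ih u (fun x hx => ha x (List.mem_cons_of_mem _ hx))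
        (fun x hx => hb x (List.mem_cons_of_mem _ hx)) hlen hvtu]

theorem pvBits_isBin (n : Nat) : pvIsBin (pvBits n) := by
  induction n using Nat.strong_induction_on with
  | _ n ih =>
    rw [pvBits]
    split
    · intro c hc
      interval_cases n <;> simp_all [Nat.digitChar]
    · rename_i h
      intro c hc
      rcases List.mem_append.mp hc with h1 | h1
      · exact ih (n / 2) (by omega) c h1
      · have : c = (n % 2).digitChar := by simpa using h1
        have h2 : n % 2 < 2 := Nat.mod_lt _ (by omega)
        interval_cases hh : (n % 2) <;> simp_all [Nat.digitChar]

theorem pvBits_val (n : Nat) : pvVal (pvBits n) = n := by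
  induction n using Nat.strong_induction_on with
  | _ n ih =>
    rw [pvBits]
    split
    · rename_i h
      interval_cases n <;> simp [pvVal, pvBVal, Nat.digitChar]
    · rename_i h
      rw [pvVal_append, ih (n / 2) (by omega)]
      have h2 : n % 2 < 2 := Nat.mod_lt _ (by omega)
      have : pvVal [(n % 2).digitChar] = n % 2 := by
        interval_cases hh : (n % 2) <;> simp [pvVal, pvBVal, Nat.digitChar]
      simp only [List.length_singleton, this]
      omega

theorem pvBits_ne_nil (n : Nat) : pvBits n ≠ [] := by
  rw [pvBits]; split <;> simp

theorem pvBits_length (n : Nat) (hn : 1 ≤ n) :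
    (pvBits n).length = PySem.Int.bitLength (n : Int) := by
  induction n using Nat.strong_induction_on with
  | _ n ih =>
    rw [pvBits, PySem.Int.bitLength_natCast (show 0 < n by omega)]
    split
    · rename_i h
      have : n = 1 := by omega
      subst this
      simp
  -- n ≥ 2
    · rename_i h
      rw [List.length_append, ih (n / 2) (by omega) (by omega)]
      simp

-- characterization of A's substring test: rotation by some k ∈ [1, L-1] fixes the digit list
theorem pvPredA_iff (g : List Char) (hg : g ≠ []) :
    PySem.Chars.isIn g ((g ++ g).tail.dropLast) = true ↔
      ∃ k : Nat, 1 ≤ k ∧ k < g.length ∧ g.drop k ++ g.take k = g := by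
  set L := g.length with hL
  have hL1 : 1 ≤ L := List.length_pos_iff.mpr hg
  have htt : (g ++ g).tail.dropLast = ((g ++ g).drop 1).take (2 * L - 2) := by
    rw [List.dropLast_eq_take, ← List.drop_one]
    congr 1
    simp [← hL]
    omega
  have hrot : ∀ k : Nat, 1 ≤ k → k < L →
      (g <+: (g ++ g).drop k ↔ g.drop k ++ g.take k = g) := by
    intro k hk1 hkL
    rw [List.drop_append_of_le_length (by omega), List.prefix_iff_eq_take,
      List.take_append, List.length_drop, ← hL,
      List.take_of_length_le (by simp [← hL]),
      show L - (L - k) = k by omega]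
    exact eq_comm
  rw [← PySem.Chars.exists_prefix_drop_iff_isIn]
  constructor
  · rintro ⟨j, hj⟩
    rw [htt, List.drop_take, List.drop_drop, List.prefix_take_iff] at hj
    obtain ⟨hpre, hlen⟩ := hj
    rw [← hL] at hlen
    refine ⟨1 + j, by omega, by omega, ?_⟩
    exact (hrot (1 + j) (by omega) (by omega)).mp hpre
  · rintro ⟨k, hk1, hkL, hfix⟩
    refine ⟨k - 1, ?_⟩
    rw [htt, List.drop_take, List.drop_drop, show 1 + (k - 1) = k by omega,
      List.prefix_take_iff]
    exact ⟨(hrot k hk1 hkL).mpr hfix, by rw [← hL]; omega⟩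

-- characterization of B's arithmetic test at t: rotation by k = L - t fixes the digit list
theorem pvArith_iff (m : Nat) (t : Nat) (ht1 : 1 ≤ t)
    (htL : t < (pvBits m).length) :
    (m / 2 ^ t + (m % 2 ^ t) * 2 ^ ((pvBits m).length - t) = m) ↔
      (pvBits m).drop ((pvBits m).length - t) ++ (pvBits m).take ((pvBits m).length - t)
        = pvBits m := by
  set g := pvBits m with hg
  set L := g.length with hL
  set k := L - t with hk
  have hkL : k < L := by omega
  have hk1 : 1 ≤ k := by omega
  -- split g = take k ++ drop k and read off the two halves' values
  have hsplit : g.take k ++ g.drop k = g := List.take_append_drop k g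
  have hvg : pvVal g = m := pvBits_val m
  have hbin : pvIsBin g := pvBits_isBin m
  have hlen_take : (g.take k).length = k := List.length_take_of_le (by omega)
  have hlen_drop : (g.drop k).length = L - k := by simp [← hL]
  have hbin_take : pvIsBin (g.take k) := fun c hc => hbin c (List.mem_of_mem_take hc)
  have hbin_drop : pvIsBin (g.drop k) := fun c hc => hbin c (List.mem_of_mem_drop hc)
  have hdlt : pvVal (g.drop k) < 2 ^ (L - k) := by
    have := pvVal_lt (g.drop k) hbin_drop
    rwa [hlen_drop] at this
  have hsum : pvVal (g.take k) * 2 ^ (L - k) + pvVal (g.drop k) = m := by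
    have := pvVal_append (g.take k) (g.drop k)
    rw [hsplit, hvg, hlen_drop] at this
    omega
  have htk : L - k = t := by omega
  rw [htk] at hdlt hsum
  have hdiv : m / 2 ^ t = pvVal (g.take k) := by
    rw [← hsum, mul_comm, Nat.mul_add_div (Nat.pow_pos (by omega)),
      Nat.div_eq_of_lt hdlt, Nat.add_zero]
  have hmod : m % 2 ^ t = pvVal (g.drop k) := by
    rw [← hsum, mul_comm, Nat.mul_add_mod, Nat.mod_eq_of_lt hdlt]
  have hval_rot : pvVal (g.drop k ++ g.take k) = m % 2 ^ t * 2 ^ k + m / 2 ^ t := by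
    rw [pvVal_append, hlen_take, hdiv, hmod]
  have hlen_rot : (g.drop k ++ g.take k).length = L := by
    rw [List.length_append, hlen_take, hlen_drop]; omega
  have hbin_rot : pvIsBin (g.drop k ++ g.take k) := by
    intro c hc
    rcases List.mem_append.mp hc with h | h
    · exact hbin_drop c h
    · exact hbin_take c h
  constructor
  · intro h
    have : pvVal (g.drop k ++ g.take k) = pvVal g := by
      rw [hval_rot, hvg]; omega
    exact pvVal_inj _ _ hbin_rot hbin (by rw [hlen_rot, hL]) this
  · intro h
    have := congrArg pvVal h
    rw [hval_rot, hvg] at this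
    omega

-- xs[1:-1] as tail.dropLast
theorem pvSlice_one_neg_one {α : Type} (xs : List α) :
    PySem.List.slice xs (some 1) (some (-1)) = xs.tail.dropLast := by
  cases xs with
  | nil => rfl
  | cons x t =>
    simp only [PySem.List.slice, PySem.List.clampIdx]
    rw [if_neg (by omega : ¬ ((1:Int) < 0))]
    rw [if_pos (by omega : ((-1):Int) < 0)]
    rw [if_neg (show ¬ (((x :: t).length : Int) + (-1) < 0) by
      push_cast [List.length_cons]; omega)]
    have h1 : (((x :: t).length : Int) + (-1)).toNat = t.length := by
      push_cast [List.length_cons]; omega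
    have h2 : min (1:Int).toNat (x :: t).length = 1 := by simp
    rw [h1, h2]
    simp [List.dropLast_eq_take]

theorem pvMem_pyRange_one (b x : Int) :
    x ∈ PySem.List.pyRange 1 b ↔ ∃ tn : Nat, 1 ≤ tn ∧ (tn : Int) < b ∧ x = (tn : Int) := by
  rw [List.mem_iff_getElem?]
  constructor
  · rintro ⟨idx, hidx⟩
    rw [PySem.List.getElem?_pyRange_one] at hidx
    split at hidx
    · rename_i hlt
      refine ⟨idx + 1, by omega, by push_cast; omega, ?_⟩
      have : (1 : Int) + idx = x := by exact_mod_cast (Option.some_inj.mp hidx)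
      push_cast
      omega
    · exact absurd hidx (by simp)
  · rintro ⟨tn, h1, hb, rfl⟩
    refine ⟨tn - 1, ?_⟩
    rw [PySem.List.getElem?_pyRange_one, if_pos (by omega), Option.some_inj]
    omega

-- A's loop test equals B's loop test, for every i the loops reach
theorem pvRotate_mul (g : List Char) (t : Nat) (h : g.rotate t = g) :
    ∀ a : Nat, g.rotate (a * t) = g := by
  intro a
  induction a with
  | zero => simp
  | succ a ih =>
    rw [Nat.succ_mul, ← List.rotate_rotate, ih, h]

theorem pvRotate_gcd (g : List Char) : ∀ a b : Nat, g.rotate a = g → g.rotate b = g →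
    g.rotate (Nat.gcd a b) = g := by
  intro a
  induction a using Nat.strong_induction_on with
  | _ a ih =>
    intro b ha hb
    rcases Nat.eq_zero_or_pos a with h0 | hpos
    · subst h0; simpa using hb
    · rw [Nat.gcd_rec a b]
      have hmul : g.rotate (b / a * a) = g := pvRotate_mul g a ha (b / a)
      have hsum : (g.rotate (b % a)).rotate (b / a * a) = g := by
        rw [List.rotate_rotate]
        rw [Nat.mod_add_div' b a]
        exact hb
      have hba : g.rotate (b % a) = g := by
        have := hsum.trans hmul.symm
        exact List.rotate_eq_rotate.mp this
      exact ih (b % a) (Nat.mod_lt b hpos) a hba ha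

theorem pvRotate_compl (g : List Char) (t : Nat) (htL : t < g.length) :
    (g.rotate (g.length - t) = g ↔ g.rotate t = g) := by
  constructor
  · intro h
    have := congrArg (fun l => List.rotate l t) h
    simp only [List.rotate_rotate] at this
    rw [show g.length - t + t = g.length by omega, List.rotate_length] at this
    exact this.symm
  · intro h
    have := congrArg (fun l => List.rotate l (g.length - t)) h
    simp only [List.rotate_rotate] at this
    rw [show t + (g.length - t) = g.length by omega, List.rotate_length] at this
    exact this.symm

theorem pvPred_eq (i : Int) (hi : 1 ≤ i) :
    PySem.Str.isIn (PySem.Int.toBin i)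
      (PySem.Str.slice (PySem.Int.toBin i ++ PySem.Int.toBin i) (some 1) (some (-1)))
      = ((PySem.List.pyRange 1 (PySem.Int.bitLength i : Int)).filter
          (fun d => PySem.Int.mod (PySem.Int.bitLength i : Int) d == 0)).any
        (fun t => (i >>> t.toNat) + (PySem.Int.mod i (1 <<< t.toNat))
            <<< ((PySem.Int.bitLength i : Int) - t).toNat == i) := by
  obtain ⟨m, rfl⟩ : ∃ m : Nat, i = (m : Int) := ⟨i.toNat, (Int.toNat_of_nonneg (by omega)).symm⟩
  have hm : 1 ≤ m := by exact_mod_cast hi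
  have hgl : (PySem.Int.toBin (m : Int)).toList = pvBits m := by
    rw [PySem.Int.toList_toBin, PySem.Int.toBinChars, if_neg (by omega : ¬ ((m:Int) < 0))]
    rw [show ((m:Int)).toNat = m from Int.toNat_natCast m, pvToDigits_eq]
  have hgne : pvBits m ≠ [] := pvBits_ne_nil m
  have hL1 : 1 ≤ (pvBits m).length := List.length_pos_iff.mpr hgne
  have hbitlen : PySem.Int.bitLength (m : Int) = (pvBits m).length := (pvBits_length m hm).symm
  rw [Bool.eq_iff_iff, PySem.Str.isIn_eq]
  have hs2 : (PySem.Str.slice (PySem.Int.toBin (m:Int) ++ PySem.Int.toBin (m:Int))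
      (some 1) (some (-1))).toList = (pvBits m ++ pvBits m).tail.dropLast := by
    rw [PySem.Str.toList_slice, PySem.Chars.slice_eq_listSlice, String.toList_append,
      hgl, pvSlice_one_neg_one]
  rw [hs2, hgl, pvPredA_iff (pvBits m) hgne]
  have htest : ∀ tn : Nat, 1 ≤ tn → tn < (pvBits m).length →
      ((((m:Int) >>> ((tn:Int)).toNat) +
          (PySem.Int.mod (m:Int) (1 <<< ((tn:Int)).toNat))
            <<< (((pvBits m).length : Int) - (tn:Int)).toNat == (m:Int)) = true
        ↔ m / 2 ^ tn + (m % 2 ^ tn) * 2 ^ ((pvBits m).length - tn) = m) := by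
    intro tn _ htn
    rw [show (((pvBits m).length : Int) - (tn:Int)).toNat = (pvBits m).length - tn by omega]
    rw [beq_iff_eq]
    rw [show ((tn:Int)).toNat = tn from Int.toNat_natCast tn]
    rw [show (1 <<< tn : Nat) = 2 ^ tn from Nat.one_shiftLeft tn]
    rw [PySem.Int.mod_natCast, ← Int.natCast_shiftRight, Nat.shiftRight_eq_div_pow,
      Int.shiftLeft_eq]
    constructor
    · intro h; exact_mod_cast h
    · intro h; exact_mod_cast h
  have hRot : ∀ k : Nat, k < (pvBits m).length →
      ((pvBits m).drop k ++ (pvBits m).take k = pvBits m ↔ (pvBits m).rotate k = pvBits m) := by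
    intro k hk
    rw [List.rotate_eq_drop_append_take (le_of_lt hk)]
  simp only [List.any_eq_true, List.mem_filter, hbitlen]
  constructor
  · rintro ⟨k, hk1, hkL, hfix⟩
    have hrotk : (pvBits m).rotate k = pvBits m := (hRot k hkL).mp hfix
    have hrotd : (pvBits m).rotate (Nat.gcd k (pvBits m).length) = pvBits m :=
      pvRotate_gcd (pvBits m) k (pvBits m).length hrotk (List.rotate_length _)
    have hd1 : 1 ≤ Nat.gcd k (pvBits m).length := Nat.gcd_pos_of_pos_left _ (by omega)
    have hdk : Nat.gcd k (pvBits m).length ≤ k := Nat.gcd_le_left _ (by omega)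
    have hdvd : Nat.gcd k (pvBits m).length ∣ (pvBits m).length := Nat.gcd_dvd_right _ _
    set d := Nat.gcd k (pvBits m).length with hddef
    refine ⟨(d : Int), ⟨(pvMem_pyRange_one _ _).mpr ⟨d, by omega, by omega, rfl⟩, ?_⟩, ?_⟩
    · rw [PySem.Int.mod_natCast, beq_iff_eq]
      exact_mod_cast Nat.mod_eq_zero_of_dvd hdvd
    · rw [htest d (by omega) (by omega)]
      rw [pvArith_iff m d (by omega) (by omega)]
      rw [(hRot _ (by omega))]
      exact (pvRotate_compl (pvBits m) d (by omega)).mpr hrotd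
  · rintro ⟨t, ⟨hmem, hdv⟩, htst⟩
    obtain ⟨tn, htn1, htnb, rfl⟩ := (pvMem_pyRange_one _ _).mp hmem
    have htnL : tn < (pvBits m).length := by exact_mod_cast htnb
    rw [htest tn htn1 htnL, pvArith_iff m tn htn1 htnL] at htst
    have hrot : (pvBits m).rotate tn = pvBits m := by
      have := (hRot ((pvBits m).length - tn) (by omega)).mp htst
      exact (pvRotate_compl (pvBits m) tn htnL).mp this
    exact ⟨tn, htn1, htnL, (hRot tn htnL).mpr hrot⟩

theorem pvLoop_eq (f : Nat) : ∀ n i L ds r, 1 ≤ i →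
    ds = (PySem.List.pyRange 1 L).filter (fun d => PySem.Int.mod L d == 0) →
    pvLoopA f n i r = pvLoopB f n i L ds r := by
  induction f with
  | zero => intro n i L ds r _ _; rfl
  | succ f ih =>
    intro n i L ds r hi hds
    rw [pvLoopA, pvLoopB]
    simp only
    split
    · by_cases hbl : ((PySem.Int.bitLength i : Int)) != L
      · rw [if_pos hbl]
        simp only
        rw [pvPred_eq i hi]
        exact ih n (i+1) _ _ _ (by omega) rfl
      · rw [if_neg hbl]
        simp only
        have hLeq : (PySem.Int.bitLength i : Int) = L := by
          simpa [bne_iff_ne] using hbl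
        rw [pvPred_eq i hi, hLeq, hds]
        exact ih n (i+1) L _ _ (by omega) rfl
    · rfl

theorem A121016_spec : Claim_equal_A121016 := by
  intro n _
  unfold Spec_A121016 A121016 A121016_alt
  exact pvLoop_eq _ n 1 1 [] [] (by omega) rfl
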